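-- pv_equiv track=rewrite | github.com/Connor-OS/AoC | 2024/day_22.py | compute_bananas
-- ===== SOURCE A (Python) =====
-- from collections import deque
--
-- def compute_bananas(buyer, sequence):
--
--     changes = deque()
--     for i, price in enumerate(buyer[1:]):
--         if len(changes) == 4:
--             changes.popleft()
--         changes.append(price - buyer[i])
--         if tuple(changes) == sequence:
--             return price
--     return 0
-- ===== SOURCE B (Python) =====
-- def compute_bananas(buyer, sequence):
--     changes = [b - a for a, b in zip(buyer, buyer[1:])]
--     index = {}
--     for key, price in zip(zip(changes, changes[1:], changes[2:], changes[3:]), buyer[4:]):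
--         if key not in index:
--             index[key] = price
--     return index.get(sequence, 0)
-- ===== Notes on version B (the rewrite author's own statement) =====
-- stated objective: idiomatic
-- what changed: Replaces the stateful deque scan with early return by building the full change list, indexing every 4-change window in a first-occurrence dict, and answering with a single dict lookup.
import Mathlib
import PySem

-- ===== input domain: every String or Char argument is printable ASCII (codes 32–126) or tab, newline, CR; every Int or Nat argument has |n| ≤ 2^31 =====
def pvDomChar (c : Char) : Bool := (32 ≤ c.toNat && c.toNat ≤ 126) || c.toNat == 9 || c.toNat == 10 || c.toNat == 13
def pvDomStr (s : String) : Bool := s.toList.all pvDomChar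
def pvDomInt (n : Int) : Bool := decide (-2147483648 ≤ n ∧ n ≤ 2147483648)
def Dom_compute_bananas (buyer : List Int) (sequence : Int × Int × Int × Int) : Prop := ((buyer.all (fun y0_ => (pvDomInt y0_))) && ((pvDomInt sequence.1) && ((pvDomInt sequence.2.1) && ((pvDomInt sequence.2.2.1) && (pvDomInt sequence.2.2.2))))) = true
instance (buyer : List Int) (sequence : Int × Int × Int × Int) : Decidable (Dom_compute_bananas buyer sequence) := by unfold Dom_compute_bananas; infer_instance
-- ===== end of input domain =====

-- B replaces A's early-returning deque scan by indexing all 4-change windows in a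
-- first-occurrence dict and doing one lookup (idiomatic restructuring, same cost).

-- ===== PORT A =====
-- tuple(changes) == sequence : true iff the deque holds exactly 4 changes equal to sequence
def pvTupEq (ch : List Int) (s : Int × Int × Int × Int) : Bool :=
  match ch with
  | [a, b, c, d] => (a, b, c, d) == s
  | _ => false

-- the loop: iterates over (buyer[i], price) pairs, i.e. consecutive pairs of buyer
-- (enumerate(buyer[1:]) with buyer[i] is exactly the consecutive-pair traversal)
def pvGoA (sequence : Int × Int × Int × Int) : List Int → List (Int × Int) → Int
  | _, [] => 0
  | changes, (prev, price) :: rest =>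
      let ch := if changes.length == 4 then changes.drop 1 else changes
      let ch := ch ++ [price - prev]
      if pvTupEq ch sequence then price else pvGoA sequence ch rest

def compute_bananas (buyer : List Int) (sequence : Int × Int × Int × Int) : Int :=
  pvGoA sequence [] (buyer.zip (buyer.drop 1))

-- ===== PORT B =====
-- zip(zip(changes, changes[1:], changes[2:], changes[3:]), buyer[4:]) — Python's 4-ary zip
-- truncates to the shortest list, exactly as the nested binary zips below do.
def compute_bananas_alt (buyer : List Int) (sequence : Int × Int × Int × Int) : Int :=
  let changes := (buyer.zip (buyer.drop 1)).map (fun p => p.2 - p.1)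
  let keys := ((changes.zip (changes.drop 1)).zip ((changes.drop 2).zip (changes.drop 3))).map
    (fun p => (p.1.1, p.1.2, p.2.1, p.2.2))
  let pairs := keys.zip (buyer.drop 4)
  let index := pairs.foldl
    (fun d kv => if d.contains kv.1 then d else d.insert kv.1 kv.2) PySem.Dict.empty
  index.getD sequence 0

-- ===== PRECONDITION & SPEC =====
def Spec_compute_bananas (buyer : List Int) (sequence : Int × Int × Int × Int) (out : Int) : Prop := out = compute_bananas_alt buyer sequence
instance (buyer : List Int) (sequence : Int × Int × Int × Int) (out : Int) : Decidable (Spec_compute_bananas buyer sequence out) := by unfold Spec_compute_bananas; infer_instance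

-- ===== CLAIM (what is proved, stated in full; the proofs are below) =====
def Claim_equal_compute_bananas : Prop := ∀ (buyer : List Int) (sequence : Int × Int × Int × Int), Dom_compute_bananas buyer sequence → Spec_compute_bananas buyer sequence (compute_bananas buyer sequence)

-- ===== LEMMAS AND PROOFS =====

-- first value paired with key `seq`, else 0 (the common specification of both results)
def pvFirst (seq : Int × Int × Int × Int) : List ((Int × Int × Int × Int) × Int) → Int
  | [] => 0
  | (k, v) :: rest => if k = seq then v else pvFirst seq rest

-- B's dict fold looks up to the first matching pair
theorem pvFold_getD (seq : Int × Int × Int × Int)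
    (ps : List ((Int × Int × Int × Int) × Int)) :
    ∀ d : PySem.Dict (Int × Int × Int × Int) Int,
      (ps.foldl (fun d kv => if d.contains kv.1 then d else d.insert kv.1 kv.2) d).getD seq 0
        = if d.contains seq then d.getD seq 0 else pvFirst seq ps := by
  induction ps with
  | nil => intro d; by_cases h : d.contains seq <;> simp [pvFirst, h, PySem.Dict.getD_of_not_contains]
  | cons kv rest ih =>
      intro d
      obtain ⟨k, v⟩ := kv
      simp only [List.foldl_cons, pvFirst]
      by_cases hk : d.contains k = true
      · rw [if_pos hk, ih d]
        by_cases hs : d.contains seq = true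
        · simp [hs]
        · have hne : k ≠ seq := fun h => hs (h ▸ hk)
          simp [hs, hne]
      · rw [if_neg hk, ih (d.insert k v)]
        by_cases hks : seq = k
        · subst hks
          simp [PySem.Dict.contains_insert_self, PySem.Dict.getD_insert_self, hk]
        · simp [PySem.Dict.getD_insert, PySem.Dict.contains_insert, hks, Ne.symm hks]

-- K l3 xs : the windows a steady-state deque (last three changes l3) emits over xs
def pvK : Int → Int → Int → List Int → List ((Int × Int × Int × Int) × Int)
  | _, _, _, [] => []
  | _, _, _, [_] => []
  | a, b, c, x :: y :: rest => ((a, b, c, y - x), y) :: pvK b c (y - x) (y :: rest)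

-- A's loop from a full deque [a,b,c,d] computes the first match among pvK b c d xs
theorem pvGoA_four (seq : Int × Int × Int × Int) (xs : List Int) :
    ∀ a b c d : Int,
      pvGoA seq [a, b, c, d] (xs.zip (xs.drop 1)) = pvFirst seq (pvK b c d xs) := by
  induction xs with
  | nil => intro a b c d; simp [pvGoA, pvK, pvFirst]
  | cons x xs ih =>
      intro a b c d
      match xs with
      | [] => simp [pvGoA, pvK, pvFirst]
      | y :: rest =>
          have hstep : pvGoA seq [a, b, c, d] ((x :: y :: rest).zip ((x :: y :: rest).drop 1))
              = if ((b, c, d, y - x) == seq) = true then y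
                else pvGoA seq [b, c, d, y - x] ((y :: rest).zip ((y :: rest).drop 1)) := rfl
          rw [hstep,
            show pvK b c d (x :: y :: rest) = ((b, c, d, y - x), y) :: pvK c d (y - x) (y :: rest) from rfl]
          simp only [pvFirst]
          by_cases h : (b, c, d, y - x) = seq
          · rw [if_pos (show ((b, c, d, y - x) == seq) = true by simpa using h), if_pos h]
          · rw [if_neg (show ¬((b, c, d, y - x) == seq) = true by simpa using h), if_neg h]
            exact ih b c d (y - x)

-- A's loop from a three-element deque likewise
theorem pvGoA_three (seq : Int × Int × Int × Int) (xs : List Int) (a b c : Int) :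
    pvGoA seq [a, b, c] (xs.zip (xs.drop 1)) = pvFirst seq (pvK a b c xs) := by
  match xs with
  | [] => simp [pvGoA, pvK, pvFirst]
  | [x] => simp [pvGoA, pvK, pvFirst]
  | x :: y :: rest =>
      have hstep : pvGoA seq [a, b, c] ((x :: y :: rest).zip ((x :: y :: rest).drop 1))
          = if ((a, b, c, y - x) == seq) = true then y
            else pvGoA seq [a, b, c, y - x] ((y :: rest).zip ((y :: rest).drop 1)) := rfl
      rw [hstep,
        show pvK a b c (x :: y :: rest) = ((a, b, c, y - x), y) :: pvK b c (y - x) (y :: rest) from rfl]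
      simp only [pvFirst]
      by_cases h : (a, b, c, y - x) = seq
      · rw [if_pos (show ((a, b, c, y - x) == seq) = true by simpa using h), if_pos h]
      · rw [if_neg (show ¬((a, b, c, y - x) == seq) = true by simpa using h), if_neg h]
        exact pvGoA_four seq (y :: rest) a b c (y - x)

-- changes of xs, as B computes them
def pvCh (xs : List Int) : List Int := (xs.zip (xs.drop 1)).map (fun p => p.2 - p.1)

theorem pvCh_cons (x y : Int) (rest : List Int) :
    pvCh (x :: y :: rest) = (y - x) :: pvCh (y :: rest) := by
  simp [pvCh]

-- B's window list over a::b::c::changes equals pvK a b c, paired with the tail prices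
theorem pvK_eq_windows (xs : List Int) :
    ∀ a b c : Int,
      pvK a b c xs
        = (((((a :: b :: c :: pvCh xs).zip ((a :: b :: c :: pvCh xs).drop 1)).zip
              (((a :: b :: c :: pvCh xs).drop 2).zip ((a :: b :: c :: pvCh xs).drop 3))).map
            (fun p => (p.1.1, p.1.2, p.2.1, p.2.2))).zip (xs.drop 1)) := by
  induction xs with
  | nil => intro a b c; simp [pvK, pvCh]
  | cons x xs ih =>
      intro a b c
      match xs with
      | [] => simp [pvK, pvCh]
      | y :: rest =>
          rw [pvCh_cons]
          simp only [pvK, List.drop_one, List.tail_cons]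
          have := ih b c (y - x)
          simp only [List.drop_one, List.tail_cons] at this
          simp [this]

-- ===== VERDICT (by name: the statement is the Claim_ definition above) =====
theorem compute_bananas_spec : Claim_equal_compute_bananas := by
  intro buyer seq _
  unfold Spec_compute_bananas compute_bananas compute_bananas_alt
  rw [pvFold_getD seq _ PySem.Dict.empty]
  simp only [PySem.Dict.contains_empty, Bool.false_eq_true, if_false]
  match buyer with
  | [] => simp [pvGoA, pvFirst]
  | [x0] => simp [pvGoA, pvFirst]
  | [x0, x1] => simp [pvGoA, pvTupEq, pvFirst]
  | [x0, x1, x2] => simp [pvGoA, pvTupEq, pvFirst]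
  | x0 :: x1 :: x2 :: x3 :: rest =>
      have hA : pvGoA seq [] ((x0 :: x1 :: x2 :: x3 :: rest).zip ((x0 :: x1 :: x2 :: x3 :: rest).drop 1))
          = pvGoA seq [x1 - x0, x2 - x1, x3 - x2] ((x3 :: rest).zip ((x3 :: rest).drop 1)) := by
        simp [pvGoA, pvTupEq]
      rw [hA, pvGoA_three seq (x3 :: rest) (x1 - x0) (x2 - x1) (x3 - x2),
        pvK_eq_windows (x3 :: rest) (x1 - x0) (x2 - x1) (x3 - x2)]
      simp [pvCh]
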